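-- pv_equiv track=rewrite | github.com/autodesk-tandem/tutorial-rest-python | common/utils.py | match_classification
-- ===== SOURCE A (Python) =====
-- def match_classification(a: str, b: str) -> bool:
--     """
--     Checks if classification b is based on classification a.
--     """
--     b_len = len(b)
--
--     while (b[b_len - 1] == '0' and b[b_len - 2] == '0'):
--         c = b[b_len - 3]
--
--         if c == ' ' or c == '.':
--             b_len -= 3
--         else:
--             break
--     a_i = 0
--     b_i = 0
--     a_c = a[a_i]
--     b_c = b[b_i]
--     while (a_i < len(a) and b_i < b_len):
--         if a_c != b_c:
--             return False
--         a_i += 1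
--         while a_i < len(a) and not a[a_i].isalnum():
--             a_i += 1
--         if a_i < len(a):
--             a_c = a[a_i]
--         b_i += 1
--         while b_i < b_len and not b[b_i].isalnum():
--             b_i += 1
--         if b_i < len(b):
--             b_c = b[b_i]
--     return b_i == b_len
-- ===== SOURCE B (Python) =====
-- def match_classification(a: str, b: str) -> bool:
--     """
--     Checks if classification b is based on classification a.
--     Two-phase formulation: trim trailing ' 00'/'.00' groups, extract the
--     compared-character sequences, then compare them as lists.
--     """
--     b_len = len(b)
--     while b_len >= 3 and b[b_len - 1] == '0' and b[b_len - 2] == '0' and b[b_len - 3] in ' .':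
--         b_len -= 3
--     seq_a = [a[0]] + [c for c in a[1:] if c.isalnum()]
--     seq_b = [b[0]] + [c for c in b[1:b_len] if c.isalnum()]
--     return len(seq_b) <= len(seq_a) and all(x == y for x, y in zip(seq_a, seq_b))
-- ===== Notes on version B (the rewrite author's own statement) =====
-- stated objective: simpler
-- what changed: A's interleaved two-pointer walk with stale-character state (a_i, b_i, a_c, b_c) is replaced by a two-phase formulation: trim the trailing ' 00'/'.00' groups, explicitly extract the two compared-character sequences ([s[0]] plus the alphanumeric characters of the rest), then compare them with a zip and a length check.
import Mathlib
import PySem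

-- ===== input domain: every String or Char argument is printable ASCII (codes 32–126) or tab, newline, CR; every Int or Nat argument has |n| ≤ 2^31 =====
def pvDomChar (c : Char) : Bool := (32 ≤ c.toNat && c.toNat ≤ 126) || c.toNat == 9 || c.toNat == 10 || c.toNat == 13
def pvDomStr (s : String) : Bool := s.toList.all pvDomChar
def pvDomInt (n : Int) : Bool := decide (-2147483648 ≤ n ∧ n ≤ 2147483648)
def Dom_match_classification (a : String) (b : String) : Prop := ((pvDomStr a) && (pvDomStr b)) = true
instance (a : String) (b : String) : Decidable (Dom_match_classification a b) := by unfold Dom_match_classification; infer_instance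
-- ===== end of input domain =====

-- B replaces A's interleaved two-pointer walk by a two-phase formulation (trim the trailing
-- ' 00'/'.00' groups, extract the two compared-character sequences, compare them as lists);
-- objective: simpler, same cost.

-- ===== PORT A =====

-- A's trailing-'00' trim loop; b_len may go negative (Python wraparound indexing via pyGet?).
-- A 'none' from pyGet? is Python's IndexError (those inputs are outside Pre_); fuel bounds iterations.
def pvTrimA (bl : List Char) : Nat → Int → Int
  | 0, bLen => bLen
  | fuel + 1, bLen =>
    match PySem.List.pyGet? bl (bLen - 1), PySem.List.pyGet? bl (bLen - 2) with
    | some c1, some c2 =>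
      if c1 = '0' ∧ c2 = '0' then
        match PySem.List.pyGet? bl (bLen - 3) with
        | some c => if c = ' ' ∨ c = '.' then pvTrimA bl fuel (bLen - 3) else bLen
        | none => bLen
      else bLen
    | _, _ => bLen

-- A's inner skip loops: 'while i < bound and not l[i].isalnum(): i += 1'
def pvSkipA (l : List Char) (bound : Int) (i : Int) : Int :=
  if h : i < bound ∧ ¬ (PySem.Chars.isalnum (PySem.List.pyGetD l i ' ') = true) then
    pvSkipA l bound (i + 1)
  else i
termination_by (bound - i).toNat
decreasing_by omega

-- A's main comparison loop, state (a_i, b_i, a_c, b_c); fuel bounds iterations (a_i grows each turn)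
def pvLoopA (al bl : List Char) (bLen : Int) : Nat → Int → Int → Char → Char → Bool
  | 0, _, _, _, _ => false
  | fuel + 1, aI, bI, aC, bC =>
    if aI < (al.length : Int) ∧ bI < bLen then
      if aC ≠ bC then false
      else
        let aI' := pvSkipA al (al.length : Int) (aI + 1)
        let aC' := if aI' < (al.length : Int) then PySem.List.pyGetD al aI' aC else aC
        let bI' := pvSkipA bl bLen (bI + 1)
        let bC' := if bI' < (bl.length : Int) then PySem.List.pyGetD bl bI' bC else bC
        pvLoopA al bl bLen fuel aI' bI' aC' bC'
    else bI == bLen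

def match_classification (a : String) (b : String) : Bool :=
  let al := a.toList
  let bl := b.toList
  let bLen := pvTrimA bl (bl.length + 1) (bl.length : Int)
  -- a[0] and b[0]: IndexError on empty input (outside Pre_), hence pyGetD
  let aC := PySem.List.pyGetD al 0 ' '
  let bC := PySem.List.pyGetD bl 0 ' '
  pvLoopA al bl bLen (al.length + 1) 0 0 aC bC

-- shape check: the string is entirely made of 3-char groups (' '|'.') '0' '0'
def pvGroups : List Char → Bool
  | [] => true
  | c1 :: c2 :: c3 :: rest => (c1 == ' ' || c1 == '.') && c2 == '0' && c3 == '0' && pvGroups rest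
  | _ => false
  -- (defined before port B so its compiled match owns its own auxiliary, not the port's)

-- ===== PORT B =====

-- B's trim loop: same trimming, guarded so indices stay in range
def pvTrimB (bl : List Char) (n : Nat) : Nat :=
  if h : 3 ≤ n ∧ bl.getD (n - 1) ' ' = '0' ∧ bl.getD (n - 2) ' ' = '0' ∧
         (bl.getD (n - 3) ' ' = ' ' ∨ bl.getD (n - 3) ' ' = '.') then
    pvTrimB bl (n - 3)
  else n
termination_by n
decreasing_by omega

def match_classification_alt (a : String) (b : String) : Bool :=
  match a.toList, b.toList with
  | ca :: ra, cb :: rb =>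
    let bLen := pvTrimB (cb :: rb) (cb :: rb).length
    let seqA := ca :: ra.filter PySem.Chars.isalnum          -- [a[0]] + [c for c in a[1:] if c.isalnum()]
    let seqB := cb :: (rb.take (bLen - 1)).filter PySem.Chars.isalnum  -- [b[0]] + [c for c in b[1:b_len] if c.isalnum()]
    decide (seqB.length ≤ seqA.length) && (seqA.zip seqB).all (fun p => p.1 == p.2)
  | _, _ => false   -- a[0] / b[0] raise IndexError in Python here (outside Pre_)

-- ===== PRECONDITION & SPEC =====

-- Pre_ excludes exactly the inputs on which A raises IndexError: empty a (a[0]), b = "0" and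
-- b consisting entirely of 3-char groups (' '|'.')'0''0' (the trim loop wraps around via
-- negative indices and runs off the front of b); pvGroups "" = true also covers empty b.
def Pre_match_classification (a : String) (b : String) : Prop :=
  a ≠ "" ∧ b ≠ "0" ∧ pvGroups b.toList = false
instance (a : String) (b : String) : Decidable (Pre_match_classification a b) := by
  unfold Pre_match_classification; infer_instance

def pvWitness_match_classification : String × String := ("12.34", "12.34.00")

def Spec_match_classification (a : String) (b : String) (out : Bool) : Prop := out = match_classification_alt a b
instance (a : String) (b : String) (out : Bool) : Decidable (Spec_match_classification a b out) := by unfold Spec_match_classification; infer_instance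

-- ===== CLAIM (what is proved, stated in full; the proofs are below) =====
def Claim_equal_match_classification : Prop := ∀ (a : String) (b : String), Dom_match_classification a b → Pre_match_classification a b → Spec_match_classification a b (match_classification a b)

-- ===== LEMMAS AND PROOFS =====

theorem drop_three (bl : List Char) (n : Nat) (h3 : 3 ≤ n) (hle : n ≤ bl.length) :
    bl.drop (n-3) = bl[n-3]'(by omega) :: bl[n-2]'(by omega) :: bl[n-1]'(by omega) :: bl.drop n := by
  rw [List.drop_eq_getElem_cons (by omega : n-3 < bl.length)]
  rw [List.drop_eq_getElem_cons (by omega : n-3+1 < bl.length)]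
  rw [List.drop_eq_getElem_cons (by omega : n-3+1+1 < bl.length)]
  have e1 : n-3+1 = n-2 := by omega
  have e2 : n-3+1+1 = n-1 := by omega
  have e3 : n-3+1+1+1 = n := by omega
  simp_rw [e3, e2, e1]

theorem pvTrimB_inv (bl : List Char) (n : Nat) (hle : n ≤ bl.length)
    (hg : pvGroups (bl.drop n) = true) :
    pvTrimB bl n ≤ n ∧ pvTrimB bl n ≤ bl.length ∧ pvGroups (bl.drop (pvTrimB bl n)) = true := by
  fun_induction pvTrimB bl n with
  | case1 n h ih =>
    obtain ⟨h3, h1, h2, hc⟩ := h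
    rw [List.getD_eq_getElem bl ' ' (by omega)] at h1 h2 hc
    have hg' : pvGroups (bl.drop (n-3)) = true := by
      rw [drop_three bl n h3 hle, h1, h2]
      rcases hc with hc | hc <;> rw [hc] <;> simpa [pvGroups] using hg
    have := ih (by omega) hg'
    exact ⟨by omega, this.2.1, this.2.2⟩
  | case2 n h => exact ⟨le_refl _, hle, hg⟩

theorem pvGroups_decomp (l : List Char) (h : pvGroups l = true) (hne : l ≠ []) :
    ∃ t c, l = t ++ [c, '0', '0'] := by
  fun_induction pvGroups l with
  | case1 => exact absurd rfl hne
  | case2 c1 c2 c3 rest ih =>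
    simp only [Bool.and_eq_true, beq_iff_eq] at h
    obtain ⟨⟨⟨-, h2⟩, h3⟩, hrest⟩ := h
    subst h2; subst h3
    by_cases hr : rest = []
    · subst hr; exact ⟨[], c1, rfl⟩
    · obtain ⟨t, c', ht⟩ := ih hrest hr
      exact ⟨c1 :: '0' :: '0' :: t, c', by simp [ht]⟩
  | case3 l h1 h2 => simp_all

theorem pvLastZero (bl : List Char) (n : Nat) (hlt : n < bl.length)
    (hg : pvGroups (bl.drop n) = true) :
    bl.getLast? = some '0' ∧ bl[bl.length - 2]? = some '0' := by
  have hne : bl.drop n ≠ [] := by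
    simp only [ne_eq, List.drop_eq_nil_iff]; omega
  obtain ⟨t, c, hd⟩ := pvGroups_decomp _ hg hne
  have hbl : bl = (bl.take n ++ t) ++ [c, '0', '0'] := by
    conv_lhs => rw [← List.take_append_drop n bl]
    rw [hd]; simp
  set u := bl.take n ++ t with hu
  have hlen : bl.length = u.length + 3 := by rw [hbl]; simp
  constructor
  · rw [hbl]; simp [List.getLast?_append]
  · rw [hbl]
    have : (u ++ [c, '0', '0']).length - 2 = u.length + 1 := by simp
    rw [this, List.getElem?_append_right (by omega)]
    simp

theorem pvTrim_eq (bl : List Char) (n : Nat) : ∀ (fuel : Nat), n ≤ bl.length →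
    pvGroups (bl.drop n) = true → pvGroups bl = false → bl ≠ ['0'] → n ≤ fuel →
    pvTrimA bl fuel (n : Int) = ((pvTrimB bl n : Nat) : Int) := by
  induction n using Nat.strong_induction_on with
  | _ n ih =>
  intro fuel hle hg hne h0 hf
  have hn0 : n ≠ 0 := by
    rintro rfl
    rw [List.drop_zero] at hg
    rw [hg] at hne
    exact absurd hne (by decide)
  obtain ⟨f, rfl⟩ : ∃ f, fuel = f + 1 := ⟨fuel - 1, by omega⟩
  by_cases h3 : 3 ≤ n
  · -- all three indices are natural
    have g1 : PySem.List.pyGet? bl ((n : Int) - 1) = some (bl[n-1]'(by omega)) := by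
      rw [(by omega : (n : Int) - 1 = ((n - 1 : Nat) : Int)), PySem.List.pyGet?_natCast,
        List.getElem?_eq_getElem (by omega)]
    have g2 : PySem.List.pyGet? bl ((n : Int) - 2) = some (bl[n-2]'(by omega)) := by
      rw [(by omega : (n : Int) - 2 = ((n - 2 : Nat) : Int)), PySem.List.pyGet?_natCast,
        List.getElem?_eq_getElem (by omega)]
    have g3 : PySem.List.pyGet? bl ((n : Int) - 3) = some (bl[n-3]'(by omega)) := by
      rw [(by omega : (n : Int) - 3 = ((n - 3 : Nat) : Int)), PySem.List.pyGet?_natCast,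
        List.getElem?_eq_getElem (by omega)]
    have e3 : (n : Int) - 3 = ((n - 3 : Nat) : Int) := by omega
    simp only [pvTrimA, g1, g2, g3]
    by_cases h12 : bl[n-1]'(by omega) = '0' ∧ bl[n-2]'(by omega) = '0'
    · rw [if_pos h12]
      by_cases hc : bl[n-3]'(by omega) = ' ' ∨ bl[n-3]'(by omega) = '.'
      · rw [if_pos hc]
        have hg' : pvGroups (bl.drop (n - 3)) = true := by
          rw [drop_three bl n h3 hle, h12.1, h12.2]
          rcases hc with hc | hc <;> rw [hc] <;> simpa [pvGroups] using hg
        rw [pvTrimB, dif_pos ⟨h3, by rw [List.getD_eq_getElem bl ' ' (by omega)]; exact h12.1,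
              by rw [List.getD_eq_getElem bl ' ' (by omega)]; exact h12.2,
              by rw [List.getD_eq_getElem bl ' ' (by omega)]; exact hc⟩]
        rw [e3]
        exact ih (n - 3) (by omega) f (by omega) hg' hne h0 (by omega)
      · rw [if_neg hc, pvTrimB, dif_neg (by
          rintro ⟨-, -, -, h⟩
          rw [List.getD_eq_getElem bl ' ' (by omega)] at h
          exact hc h)]
    · rw [if_neg h12, pvTrimB, dif_neg (by
        rintro ⟨-, ha, hb, -⟩
        rw [List.getD_eq_getElem bl ' ' (by omega)] at ha
        rw [List.getD_eq_getElem bl ' ' (by omega)] at hb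
        exact h12 ⟨ha, hb⟩)]
  · -- n = 1 or n = 2
    have hBstop : pvTrimB bl n = n := by rw [pvTrimB, dif_neg (by rintro ⟨h, -⟩; omega)]
    rw [hBstop]
    have hn1 : 1 ≤ n := by omega
    interval_cases n
    · -- n = 1
      have g1 : PySem.List.pyGet? bl (((1 : Nat) : Int) - 1) = some (bl[0]'(by omega)) := by
        rw [(by omega : ((1 : Nat) : Int) - 1 = ((0 : Nat) : Int)), PySem.List.pyGet?_natCast,
          List.getElem?_eq_getElem (by omega)]
      have g2 : PySem.List.pyGet? bl (((1 : Nat) : Int) - 2) = bl.getLast? := by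
        rw [(by omega : ((1 : Nat) : Int) - 2 = (-1 : Int)), PySem.List.pyGet?_neg_one]
      rcases Nat.lt_or_ge 1 bl.length with hlt | hge
      · -- trimming happened before reaching 1: last two chars of bl are '0'
        obtain ⟨hlast, hlast2⟩ := pvLastZero bl 1 hlt hg
        have g3 : PySem.List.pyGet? bl (((1 : Nat) : Int) - 3) = some '0' := by
          rw [(by omega : ((1 : Nat) : Int) - 3 = (-2 : Int)),
            PySem.List.pyGet?_neg_ofNat bl 2 (by omega) (by omega), hlast2]
        simp only [pvTrimA, g1, g2, hlast, g3]
        split_ifs with h1 h2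
        · exact absurd h2 (by decide)
        · rfl
        · rfl
      · -- bl has length 1; bl ≠ ['0'] so bl[0] ≠ '0'
        obtain ⟨c, rfl⟩ := List.length_eq_one_iff.mp (by omega : bl.length = 1)
        have hc0 : c ≠ '0' := by rintro rfl; exact h0 rfl
        simp only [pvTrimA, g1, g2]
        simp only [List.getLast?_singleton, List.getElem_singleton]
        rw [if_neg (by rintro ⟨h, -⟩; exact hc0 h)]
    · -- n = 2
      have g1 : PySem.List.pyGet? bl (((2 : Nat) : Int) - 1) = some (bl[1]'(by omega)) := by
        rw [(by omega : ((2 : Nat) : Int) - 1 = ((1 : Nat) : Int)), PySem.List.pyGet?_natCast,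
          List.getElem?_eq_getElem (by omega)]
      have g2 : PySem.List.pyGet? bl (((2 : Nat) : Int) - 2) = some (bl[0]'(by omega)) := by
        rw [(by omega : ((2 : Nat) : Int) - 2 = ((0 : Nat) : Int)), PySem.List.pyGet?_natCast,
          List.getElem?_eq_getElem (by omega)]
      by_cases h12 : bl[1]'(by omega) = '0' ∧ bl[0]'(by omega) = '0'
      · have hlast : bl.getLast? = some '0' := by
          rcases Nat.lt_or_ge 2 bl.length with hlt | hge
          · exact (pvLastZero bl 2 hlt hg).1
          · rw [List.getLast?_eq_getElem?, (by omega : bl.length - 1 = 1),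
              List.getElem?_eq_getElem (by omega)]
            exact congrArg some h12.1
        have g3 : PySem.List.pyGet? bl (((2 : Nat) : Int) - 3) = some '0' := by
          rw [(by omega : ((2 : Nat) : Int) - 3 = (-1 : Int)), PySem.List.pyGet?_neg_one, hlast]
        simp only [pvTrimA, g1, g2, g3]
        rw [if_pos h12, if_neg (by rintro (h | h) <;> exact absurd h (by decide))]
      · simp only [pvTrimA, g1, g2]
        rw [if_neg h12]

theorem pvSkipA_spec (l : List Char) (bound i : Nat) (hib : i ≤ bound) (hbl : bound ≤ l.length) :
    ∃ j : Nat, pvSkipA l (bound : Int) (i : Int) = (j : Int) ∧ i ≤ j ∧ j ≤ bound ∧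
      ((l.take bound).drop i).filter PySem.Chars.isalnum =
        (if h : j < bound then
          l[j]'(by omega) :: ((l.take bound).drop (j + 1)).filter PySem.Chars.isalnum
         else []) := by
  by_cases hi : i < bound
  · have hgetT : (l.take bound).drop i = l[i]'(by omega) :: (l.take bound).drop (i + 1) := by
      rw [List.drop_eq_getElem_cons (by rw [List.length_take]; omega)]
      congr 1
      exact List.getElem_take
    have hget : PySem.List.pyGetD l (i : Int) ' ' = l[i]'(by omega) := by
      rw [PySem.List.pyGetD_natCast, List.getD_eq_getElem l ' ' (by omega)]
    by_cases ha : PySem.Chars.isalnum (l[i]'(by omega)) = true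
    · -- stop here: current char is alnum
      refine ⟨i, ?_, le_refl i, hib, ?_⟩
      · rw [pvSkipA, dif_neg (by rintro ⟨-, h⟩; rw [hget] at h; exact h ha)]
      · rw [dif_pos hi, hgetT, List.filter_cons_of_pos ha]
    · -- skip this char
      obtain ⟨j, hj, hij, hjb, hfil⟩ := pvSkipA_spec l bound (i + 1) (by omega) hbl
      refine ⟨j, ?_, by omega, hjb, ?_⟩
      · rw [pvSkipA, dif_pos ⟨by exact_mod_cast hi, by rw [hget]; exact ha⟩,
          (by push_cast; ring : (i : Int) + 1 = ((i + 1 : Nat) : Int)), hj]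
      · rw [hgetT, List.filter_cons_of_neg (by simpa using ha), hfil]
  · -- i = bound
    have hieq : i = bound := by omega
    refine ⟨i, ?_, le_refl i, hib, ?_⟩
    · rw [pvSkipA, dif_neg (by rintro ⟨h, -⟩; exact absurd h (by exact_mod_cast (by omega : ¬ (i : Int) < (bound : Int))))]
    · rw [dif_neg (by omega)]
      rw [List.drop_eq_nil_iff.mpr (by rw [List.length_take]; omega)]
      simp
termination_by bound - i
decreasing_by omega

def cmpB (xs ys : List Char) : Bool :=
  decide (ys.length ≤ xs.length) && (xs.zip ys).all (fun p => p.1 == p.2)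

theorem cmpB_nil_right (xs : List Char) : cmpB xs [] = true := by simp [cmpB]

theorem cmpB_nil_left (ys : List Char) : cmpB [] ys = (ys.length == 0) := by
  cases ys <;> simp [cmpB]

theorem cmpB_cons (x y : Char) (xs ys : List Char) :
    cmpB (x :: xs) (y :: ys) = ((x == y) && cmpB xs ys) := by
  simp [cmpB, Bool.and_left_comm]

theorem pvLoopA_eq (al bl : List Char) (bLen : Nat) (fuel i j : Nat)
    (hb : bLen ≤ bl.length) (hi : i < al.length) (hj : j < bLen)
    (hf : al.length - i < fuel) :
    pvLoopA al bl (bLen : Int) fuel (i : Int) (j : Int) (al[i]'hi) (bl[j]'(by omega)) =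
      cmpB ((al[i]'hi) :: (al.drop (i + 1)).filter PySem.Chars.isalnum)
           ((bl[j]'(by omega)) :: ((bl.take bLen).drop (j + 1)).filter PySem.Chars.isalnum) := by
  induction fuel generalizing i j with
  | zero => omega
  | succ f ihf =>
  rw [pvLoopA]
  rw [if_pos ⟨by exact_mod_cast hi, by exact_mod_cast hj⟩]
  by_cases heq : (al[i]'hi) = (bl[j]'(by omega : j < bl.length))
  · rw [if_neg (by simpa using heq)]
    -- characterize the two skips
    obtain ⟨i', hi'eq, hii', hi'b, hfa⟩ := pvSkipA_spec al al.length (i + 1) (by omega) le_rfl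
    obtain ⟨j', hj'eq, hjj', hj'b, hfb⟩ := pvSkipA_spec bl bLen (j + 1) (by omega) hb
    rw [List.take_length] at hfa
    have hcast_a : (i : Int) + 1 = ((i + 1 : Nat) : Int) := by push_cast; ring
    have hcast_b : (j : Int) + 1 = ((j + 1 : Nat) : Int) := by push_cast; ring
    simp only [hcast_a, hcast_b, hi'eq, hj'eq]
    rw [cmpB_cons, show ((al[i]'hi) == (bl[j]'(by omega : j < bl.length))) = true from
      beq_iff_eq.mpr heq, Bool.true_and]
    by_cases hia : i' < al.length
    · rw [dif_pos hia] at hfa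
      have haC' : (if ((i' : Nat) : Int) < (al.length : Int) then
          PySem.List.pyGetD al ((i' : Nat) : Int) (al[i]'hi) else al[i]'hi) = al[i']'hia := by
        rw [if_pos (by exact_mod_cast hia), PySem.List.pyGetD_natCast,
          List.getD_eq_getElem al _ hia]
      by_cases hjb2 : j' < bLen
      · rw [dif_pos hjb2] at hfb
        have hbC' : (if ((j' : Nat) : Int) < (bl.length : Int) then
            PySem.List.pyGetD bl ((j' : Nat) : Int) (bl[j]'(by omega)) else bl[j]'(by omega)) =
            bl[j']'(by omega) := by
          rw [if_pos (by exact_mod_cast (by omega : j' < bl.length)),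
            PySem.List.pyGetD_natCast, List.getD_eq_getElem bl _ (by omega)]
        rw [haC', hbC', hfa, hfb]
        exact ihf i' j' hia hjb2 (by omega)
      · -- b side exhausted: remaining b-sequence is empty, loop returns true
        rw [dif_neg hjb2] at hfb
        have hj'eq2 : j' = bLen := by omega
        rw [hfa, hfb, cmpB_nil_right]
        -- LHS: next iteration exits with b_i = bLen
        obtain ⟨f', rfl⟩ : ∃ f', f = f' + 1 := ⟨f - 1, by omega⟩
        rw [pvLoopA, if_neg (by rintro ⟨-, h⟩; rw [hj'eq2] at h; exact absurd h (by omega))]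
        simp [hj'eq2]
    · -- a side exhausted
      rw [dif_neg hia] at hfa
      have hi'eq2 : i' = al.length := by omega
      rw [hfa, cmpB_nil_left]
      obtain ⟨f', rfl⟩ : ∃ f', f = f' + 1 := ⟨f - 1, by omega⟩
      rw [pvLoopA, if_neg (by rintro ⟨h, -⟩; rw [hi'eq2] at h; exact absurd h (by omega))]
      by_cases hjb2 : j' < bLen
      · rw [dif_pos hjb2] at hfb
        have hne2 : ¬ ((j' : Nat) : Int) = ((bLen : Nat) : Int) := by
          exact_mod_cast (by omega : ¬ j' = bLen)
        simp [hfb, hne2]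
      · rw [dif_neg hjb2] at hfb
        have : j' = bLen := by omega
        simp [hfb, this]
  · rw [if_pos (by simpa using heq), cmpB_cons]
    simp [heq]

theorem pvMain (a b : String) (ha : a ≠ "") (hb0 : b ≠ "0") (hgroups : pvGroups b.toList = false) :
    match_classification a b = match_classification_alt a b := by
  obtain ⟨ca, ra, hale⟩ := List.exists_cons_of_ne_nil (by simpa using ha : a.toList ≠ [])
  have hbl : b.toList ≠ [] := by
    intro h; rw [h] at hgroups; exact absurd hgroups (by decide)
  obtain ⟨cb, rb, hble⟩ := List.exists_cons_of_ne_nil hbl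
  have hbl0 : b.toList ≠ ['0'] := fun h => hb0 (String.toList_inj.mp h)
  -- the two trim loops agree
  have htrim : pvTrimA b.toList (b.toList.length + 1) (b.toList.length : Int) =
      ((pvTrimB b.toList b.toList.length : Nat) : Int) :=
    pvTrim_eq b.toList b.toList.length (b.toList.length + 1) le_rfl
      (by rw [List.drop_length]; rfl) hgroups hbl0 (by omega)
  have hinv := pvTrimB_inv b.toList b.toList.length le_rfl (by rw [List.drop_length]; rfl)
  set m := pvTrimB b.toList b.toList.length with hm
  have hmle : m ≤ b.toList.length := hinv.2.1
  have hm1 : 1 ≤ m := by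
    rcases Nat.eq_zero_or_pos m with h0 | h1
    · rw [h0, List.drop_zero] at hinv
      rw [hinv.2.2] at hgroups
      exact absurd hgroups (by decide)
    · exact h1
  obtain ⟨m', hm'⟩ : ∃ m', m = m' + 1 := ⟨m - 1, by omega⟩
  have h0a : ((0 : Int)) = ((0 : Nat) : Int) := by norm_num
  have hca : PySem.List.pyGetD a.toList 0 ' ' = a.toList[0]'(by rw [hale]; simp) := by
    rw [PySem.List.pyGetD_zero, List.getD_eq_getElem _ _ (by rw [hale]; simp)]
  have hcb : PySem.List.pyGetD b.toList 0 ' ' = b.toList[0]'(by rw [hble]; simp) := by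
    rw [PySem.List.pyGetD_zero, List.getD_eq_getElem _ _ (by rw [hble]; simp)]
  rw [match_classification]
  simp only [hca, hcb, htrim]
  rw [h0a]
  rw [pvLoopA_eq a.toList b.toList m (a.toList.length + 1) 0 0 hmle
    (by rw [hale]; simp) (by omega) (by omega)]
  -- now reduce the B side
  have halt : match_classification_alt a b =
      cmpB (ca :: ra.filter PySem.Chars.isalnum)
           (cb :: (rb.take (m - 1)).filter PySem.Chars.isalnum) := by
    have hmeq : pvTrimB (cb :: rb) (cb :: rb).length = m := by rw [hm, hble]
    unfold match_classification_alt
    rw [hale, hble]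
    dsimp only
    rw [hmeq, cmpB]
  rw [halt]
  -- identify heads and tails
  have hhead_a : a.toList[0]'(by rw [hale]; simp) = ca := by
    simp [hale]
  have hhead_b : b.toList[0]'(by rw [hble]; simp) = cb := by
    simp [hble]
  have htail_a : a.toList.drop 1 = ra := by rw [hale]; rfl
  have htail_b : (b.toList.take m).drop 1 = rb.take (m - 1) := by
    rw [hble, hm', List.take_succ_cons, List.drop_one, List.tail_cons]
    norm_num
  rw [hhead_a, hhead_b, htail_a, htail_b]

-- ===== VERDICT (by name: the statement is the Claim_ definition above) =====
theorem match_classification_spec : Claim_equal_match_classification := by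
  intro a b _ hpre
  unfold Pre_match_classification at hpre
  unfold Spec_match_classification
  exact pvMain a b hpre.1 hpre.2.1 hpre.2.2
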